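-- pv_equiv track=rewrite | github.com/predictable-edge/edge-use-case | emulation-srs/log-extract.py | find_blocks
-- ===== SOURCE A (Python) =====
-- def is_ip_line(line):
--     return '[IP]' in line
--
-- def is_data_line(line):
--     line = line.strip()
--     if line == '...':
--         return True
--     if not line.startswith('00'):
--         return False
--     parts = line.split(':')
--     if len(parts) != 2:
--         return False
--     hex_addr = parts[0]
--     return len(hex_addr) == 4 and all(c in '0123456789abcdefABCDEF' for c in hex_addr)
--
-- def find_blocks(lines):
--     blocks = []
--     i = 0
--     current_pattern = None
--     pattern_lines = []
--     block_lines = []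
--
--     while i < len(lines):
--         if is_ip_line(lines[i]):
--             # Get complete pattern (IP line + data lines)
--             temp_pattern = []
--             j = i
--             while j < len(lines) and (is_ip_line(lines[j]) or is_data_line(lines[j])):
--                 temp_pattern.append(lines[j])
--                 j += 1
--
--             if current_pattern is None:
--                 current_pattern = temp_pattern
--                 pattern_lines = [i]
--                 block_lines.extend(temp_pattern)
--             elif temp_pattern == current_pattern:
--                 pattern_lines.append(i)
--                 block_lines.extend(temp_pattern)
--             else:
--                 if block_lines:
--                     blocks.append((pattern_lines.copy(), block_lines.copy()))
--                 current_pattern = temp_pattern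
--                 pattern_lines = [i]
--                 block_lines = temp_pattern.copy()
--             i = j
--         else:
--             if block_lines:
--                 blocks.append((pattern_lines.copy(), block_lines.copy()))
--                 current_pattern = None
--                 pattern_lines = []
--                 block_lines = []
--             i += 1
--
--     if block_lines:
--         blocks.append((pattern_lines.copy(), block_lines.copy()))
--
--     return blocks
-- ===== SOURCE B (Python) =====
-- def is_ip_line(line):
--     return '[IP]' in line
--
-- def is_data_line(line):
--     line = line.strip()
--     if line == '...':
--         return True
--     if not line.startswith('00'):
--         return False
--     parts = line.split(':')
--     if len(parts) != 2:
--         return False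
--     hex_addr = parts[0]
--     return len(hex_addr) == 4 and all(c in '0123456789abcdefABCDEF' for c in hex_addr)
--
-- def find_blocks(lines):
--     # Segment into maximal runs of IP-or-data lines; each run with an IP line
--     # yields one block starting at its first IP line.
--     blocks = []
--     i = 0
--     n = len(lines)
--     while i < n:
--         if is_ip_line(lines[i]) or is_data_line(lines[i]):
--             j = i + 1
--             while j < n and (is_ip_line(lines[j]) or is_data_line(lines[j])):
--                 j += 1
--             for k in range(i, j):
--                 if is_ip_line(lines[k]):
--                     blocks.append(([k], lines[k:j]))
--                     break
--             i = j
--         else: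
--             i += 1
--     return blocks
-- ===== Notes on version B (the rewrite author's own statement) =====
-- stated objective: simpler
-- what changed: B drops A's current_pattern/pattern_lines/block_lines state machine with its flush-and-compare branches (the pattern-merging branch is dead) and instead segments the input into maximal runs of IP-or-data lines, emitting one block per run starting at its first IP line.
import Mathlib
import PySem

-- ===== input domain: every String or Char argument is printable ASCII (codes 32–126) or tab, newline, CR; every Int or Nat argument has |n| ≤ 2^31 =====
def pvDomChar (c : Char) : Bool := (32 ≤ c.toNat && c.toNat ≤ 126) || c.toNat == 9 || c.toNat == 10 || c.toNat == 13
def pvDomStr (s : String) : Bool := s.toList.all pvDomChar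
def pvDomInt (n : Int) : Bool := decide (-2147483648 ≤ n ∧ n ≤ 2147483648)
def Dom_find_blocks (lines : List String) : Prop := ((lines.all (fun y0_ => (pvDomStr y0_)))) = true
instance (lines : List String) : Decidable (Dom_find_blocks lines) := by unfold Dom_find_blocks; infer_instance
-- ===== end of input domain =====

-- B replaces A's pattern/flush state machine by run segmentation plus a first-IP search (objective: simpler).
-- Both while loops are ported with a fuel parameter (fuel = number of remaining lines, a pure totality
-- guard: each iteration consumes at least one line, so fuel never runs out on the stated calls).

-- ===== PORT A =====
def is_ip_line (line : String) : Bool := PySem.Str.isIn "[IP]" line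

def is_data_line (line : String) : Bool :=
  let l := PySem.Str.strip line
  if l == "..." then true
  else if !(PySem.Str.startswith l "00") then false
  else
    -- l.split(':') : ':' is a nonempty separator, so split? is always `some`
    match PySem.Str.split? l ":" with
    | some [hexAddr, _] =>
        decide (PySem.Str.len hexAddr = 4) &&
        hexAddr.toList.all (fun c => PySem.Str.isIn (String.ofList [c]) "0123456789abcdefABCDEF")
    | _ => false

-- A's inner while loop: the maximal prefix of IP-or-data lines (temp_pattern)
def pvTempPattern : List String → List String
  | [] => []
  | l :: t => if is_ip_line l || is_data_line l then l :: pvTempPattern t else []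

-- A's outer while loop, recursion on the remaining suffix; i is the current index,
-- (curp, patl, bll) = (current_pattern, pattern_lines, block_lines)
def pvLoopA : Nat → List String → Int → List (List Int × List String) →
    Option (List String) → List Int → List String → List (List Int × List String)
  | _, [], _, blocks, _, patl, bll =>
      if bll ≠ [] then blocks ++ [(patl, bll)] else blocks
  | 0, _ :: _, _, blocks, _, _, _ => blocks
  | fuel + 1, l :: t, i, blocks, curp, patl, bll =>
      if is_ip_line l then
        let tp := l :: pvTempPattern t
        let rest := t.drop (pvTempPattern t).length
        match curp with
        | none => pvLoopA fuel rest (i + tp.length) blocks (some tp) [i] (bll ++ tp)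
        | some cp =>
            if tp = cp then
              pvLoopA fuel rest (i + tp.length) blocks (some cp) (patl ++ [i]) (bll ++ tp)
            else
              pvLoopA fuel rest (i + tp.length)
                (if bll ≠ [] then blocks ++ [(patl, bll)] else blocks) (some tp) [i] tp
      else
        if bll ≠ [] then pvLoopA fuel t (i + 1) (blocks ++ [(patl, bll)]) none [] []
        else pvLoopA fuel t (i + 1) blocks curp patl bll

def find_blocks (lines : List String) : List (List Int × List String) :=
  pvLoopA lines.length lines 0 [] none [] []

-- ===== PORT B =====
-- B's inner while loop: the maximal run of IP-or-data lines
def pvRunB : List String → List String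
  | [] => []
  | l :: t => if is_ip_line l || is_data_line l then l :: pvRunB t else []

-- B's 'for k in range(i, j): if is_ip_line: …; break' — offset of the first IP line of the run
def pvFirstIp : List String → Option Nat
  | [] => none
  | l :: t => if is_ip_line l then some 0 else (pvFirstIp t).map (· + 1)

def pvLoopB : Nat → List String → Int → List (List Int × List String) → List (List Int × List String)
  | _, [], _, blocks => blocks
  | 0, _ :: _, _, blocks => blocks
  | fuel + 1, l :: t, i, blocks =>
      if is_ip_line l || is_data_line l then
        let run := l :: pvRunB t
        let rest := t.drop (pvRunB t).length
        let blocks' :=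
          match pvFirstIp run with
          | some k => blocks ++ [([i + (k : Int)], run.drop k)]
          | none => blocks
        pvLoopB fuel rest (i + run.length) blocks'
      else
        pvLoopB fuel t (i + 1) blocks

def find_blocks_alt (lines : List String) : List (List Int × List String) :=
  pvLoopB lines.length lines 0 []

-- ===== PRECONDITION & SPEC =====
def Spec_find_blocks (lines : List String) (out : List (List Int × List String)) : Prop := out = find_blocks_alt lines
instance (lines : List String) (out : List (List Int × List String)) : Decidable (Spec_find_blocks lines out) := by unfold Spec_find_blocks; infer_instance

-- ===== CLAIM (what is proved, stated in full; the proofs are below) =====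
def Claim_equal_find_blocks : Prop := ∀ (lines : List String), Dom_find_blocks lines → Spec_find_blocks lines (find_blocks lines)

-- ===== LEMMAS AND PROOFS =====

lemma pvTempPattern_len_le (t : List String) : (pvTempPattern t).length ≤ t.length := by
  induction t with
  | nil => simp [pvTempPattern]
  | cons l t ih => simp only [pvTempPattern]; split <;> simp <;> omega

-- canonical form both loops compute (fuel-indexed like the ports)
def pvCanon : Nat → List String → Int → List (List Int × List String)
  | _, [], _ => []
  | 0, _ :: _, _ => []
  | fuel + 1, l :: t, i =>
      if is_ip_line l then
        ([i], l :: pvTempPattern t) ::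
          pvCanon fuel (t.drop (pvTempPattern t).length) (i + 1 + (pvTempPattern t).length)
      else pvCanon fuel t (i + 1)

lemma pvCanon_congr (f : Nat) (ls : List String) {i j : Int} (h : i = j) :
    pvCanon f ls i = pvCanon f ls j := by rw [h]

lemma pvCanon_fuel : ∀ (f g : Nat) (ls : List String) (i : Int),
    ls.length ≤ f → ls.length ≤ g → pvCanon f ls i = pvCanon g ls i := by
  intro f
  induction f with
  | zero =>
    intro g ls i hf _
    have : ls = [] := List.eq_nil_of_length_eq_zero (by omega)
    subst this; simp [pvCanon]
  | succ f ih =>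
    intro g ls i hf hg
    match ls with
    | [] => simp [pvCanon]
    | l :: t =>
      match g with
      | 0 => simp at hg
      | g + 1 =>
        simp only [List.length_cons] at hf hg
        by_cases hip : is_ip_line l = true
        · rw [pvCanon, pvCanon]
          simp only [hip, if_true]
          congr 1
          exact ih g _ _ (by have := pvTempPattern_len_le t; simp only [List.length_drop]; omega)
            (by have := pvTempPattern_len_le t; simp only [List.length_drop]; omega)
        · rw [pvCanon, pvCanon]
          simp only [hip, Bool.false_eq_true, if_false]
          exact ih g t (i + 1) (by omega) (by omega)

lemma pvRunB_eq (t : List String) : pvRunB t = pvTempPattern t := by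
  induction t with
  | nil => rfl
  | cons l t ih => simp only [pvRunB, pvTempPattern, ih]

-- after the maximal good prefix, the remainder is empty or starts with a non-good line
lemma pvTempPattern_rest (t : List String) :
    t.drop (pvTempPattern t).length = [] ∨
    ∃ r rt, t.drop (pvTempPattern t).length = r :: rt ∧ (is_ip_line r || is_data_line r) = false := by
  induction t with
  | nil => left; rfl
  | cons l t ih =>
    by_cases h : (is_ip_line l || is_data_line l) = true
    · simpa [pvTempPattern, h] using ih
    · right
      refine ⟨l, t, ?_, by simpa using h⟩
      simp [pvTempPattern, Bool.not_eq_true] at h ⊢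
      simp [h]

lemma pvTempPattern_good (t : List String) :
    ∀ x ∈ pvTempPattern t, (is_ip_line x || is_data_line x) = true := by
  induction t with
  | nil => simp [pvTempPattern]
  | cons l t ih =>
    simp only [pvTempPattern]
    split
    · rename_i h
      intro x hx
      rcases List.mem_cons.mp hx with rfl | hx
      · exact h
      · exact ih x hx
    · simp

lemma pvTempPattern_decomp (t : List String) :
    pvTempPattern t ++ t.drop (pvTempPattern t).length = t := by
  induction t with
  | nil => rfl
  | cons l t ih =>
    by_cases h : (is_ip_line l || is_data_line l) = true
    · simp only [pvTempPattern, h, if_true, List.length_cons, List.drop_succ_cons,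
        List.cons_append]
      rw [ih]
    · simp [pvTempPattern, h]

lemma pvTempPattern_append_of_good (pre rest : List String)
    (hpre : ∀ x ∈ pre, (is_ip_line x || is_data_line x) = true)
    (hrest : pvTempPattern rest = []) :
    pvTempPattern (pre ++ rest) = pre := by
  induction pre with
  | nil => simpa using hrest
  | cons p ps ih =>
    have hp := hpre p (by simp)
    simp only [List.cons_append, pvTempPattern, hp, if_true]
    rw [ih (fun x hx => hpre x (by simp [hx]))]

lemma pvTempPattern_nil_of_bad (rest : List String)
    (h : rest = [] ∨ ∃ r rt, rest = r :: rt ∧ (is_ip_line r || is_data_line r) = false) :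
    pvTempPattern rest = [] := by
  rcases h with rfl | ⟨r, rt, rfl, hr⟩
  · rfl
  · simp [pvTempPattern, hr]

-- A = canon, from the clean state
lemma pvLoopA_eq_canon : ∀ (n : Nat), ∀ (fuel : Nat) (ls : List String),
    ls.length ≤ n → ls.length ≤ fuel →
    ∀ (i : Int) (blocks : List (List Int × List String)),
    pvLoopA fuel ls i blocks none [] [] = blocks ++ pvCanon fuel ls i := by
  intro n
  induction n with
  | zero =>
    intro fuel ls hn hf i blocks
    have : ls = [] := List.eq_nil_of_length_eq_zero (by omega)
    subst this; simp [pvLoopA, pvCanon]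
  | succ n ih =>
    intro fuel ls hn hf i blocks
    match ls with
    | [] => simp [pvLoopA, pvCanon]
    | l :: t =>
      obtain ⟨f, rfl⟩ : ∃ f, fuel = f + 1 :=
        ⟨fuel - 1, by simp only [List.length_cons] at hf; omega⟩
      simp only [List.length_cons] at hn hf
      by_cases hip : is_ip_line l = true
      · rw [pvLoopA, pvCanon]
        simp only [hip, if_true, List.nil_append]
        rcases pvTempPattern_rest t with h0 | ⟨r, rt, heq, hbad⟩
        · rw [h0, pvLoopA]
          rw [if_pos (by simp)]
          simp [pvCanon]
        · rw [heq]
          have hdl : (t.drop (pvTempPattern t).length).length =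
              t.length - (pvTempPattern t).length := List.length_drop
          rw [heq] at hdl
          simp only [List.length_cons] at hdl
          have htp := pvTempPattern_len_le t
          obtain ⟨f', rfl⟩ : ∃ f', f = f' + 1 := ⟨f - 1, by omega⟩
          rw [pvLoopA]
          have hrip : is_ip_line r = false := (Bool.or_eq_false_iff.mp hbad).1
          simp only [hrip, Bool.false_eq_true, if_false]
          rw [if_pos (by simp)]
          have hrtn : rt.length ≤ n := by omega
          have hrtf : rt.length ≤ f' := by omega
          rw [ih f' rt hrtn hrtf]
          rw [show pvCanon (f' + 1) (r :: rt) (i + 1 + ((pvTempPattern t).length : Int)) =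
                pvCanon f' rt (i + 1 + ((pvTempPattern t).length : Int) + 1) from by
              rw [pvCanon]; simp [hrip]]
          rw [show pvCanon f' rt (i + ↑(l :: pvTempPattern t).length + 1) =
                pvCanon f' rt (i + 1 + ((pvTempPattern t).length : Int) + 1) from
              pvCanon_congr f' rt (by simp only [List.length_cons]; push_cast; ring)]
          simp
      · rw [pvLoopA, pvCanon]
        simp only [hip, Bool.false_eq_true, if_false, ne_eq, not_true_eq_false]
        exact ih f t (by omega) (by omega) (i + 1) blocks

-- canon over a good run followed by a bad-or-empty remainder
lemma pvCanon_run (rest : List String)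
    (hrest : rest = [] ∨ ∃ r rt, rest = r :: rt ∧ (is_ip_line r || is_data_line r) = false)
    (f2 : Nat) (hf2 : rest.length ≤ f2) :
    ∀ (pre : List String) (f1 : Nat), (pre ++ rest).length ≤ f1 →
    ∀ (i : Int), (∀ x ∈ pre, (is_ip_line x || is_data_line x) = true) →
    pvCanon f1 (pre ++ rest) i =
      (match pvFirstIp pre with
       | some k => [([i + (k : Int)], pre.drop k)]
       | none => []) ++ pvCanon f2 rest (i + pre.length) := by
  intro pre
  induction pre with
  | nil =>
    intro f1 h1 i _
    simp only [pvFirstIp, List.nil_append, List.length_nil, Nat.cast_zero, add_zero]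
    exact pvCanon_fuel f1 f2 rest i (by simpa using h1) hf2
  | cons p ps ih =>
    intro f1 h1 i hpre
    obtain ⟨g, rfl⟩ : ∃ g, f1 = g + 1 :=
      ⟨f1 - 1, by simp only [List.cons_append, List.length_cons] at h1; omega⟩
    simp only [List.cons_append, List.length_cons, List.length_append] at h1
    by_cases hp : is_ip_line p = true
    · rw [List.cons_append, pvCanon]
      simp only [hp, if_true]
      have hps : pvTempPattern (ps ++ rest) = ps :=
        pvTempPattern_append_of_good ps rest
          (fun x hx => hpre x (by simp [hx]))
          (pvTempPattern_nil_of_bad rest hrest)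
      rw [hps]
      have hdrop : (ps ++ rest).drop ps.length = rest := by simp
      rw [hdrop]
      rw [pvCanon_fuel g f2 rest _ (by omega) hf2]
      simp only [pvFirstIp, hp, if_true, List.drop_zero, Nat.cast_zero, add_zero,
        List.singleton_append, List.length_cons]
      congr 2 <;> (push_cast; omega)
    · rw [List.cons_append, pvCanon]
      simp only [hp, Bool.false_eq_true, if_false]
      rw [ih g (by simp; omega) (i + 1) (fun x hx => hpre x (by simp [hx]))]
      simp only [pvFirstIp, hp, Bool.false_eq_true, if_false]
      cases hfi : pvFirstIp ps with
      | none =>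
        simp only [hfi, Option.map_none, List.nil_append, List.length_cons]
        apply pvCanon_congr; push_cast; ring
      | some k =>
        simp only [hfi, Option.map_some, List.singleton_append, List.length_cons,
          List.drop_succ_cons]
        congr 2 <;> simp <;> omega

-- B = canon
lemma pvLoopB_eq_canon : ∀ (n : Nat), ∀ (fuel : Nat) (ls : List String),
    ls.length ≤ n → ls.length ≤ fuel →
    ∀ (i : Int) (blocks : List (List Int × List String)),
    pvLoopB fuel ls i blocks = blocks ++ pvCanon fuel ls i := by
  intro n
  induction n with
  | zero =>
    intro fuel ls hn hf i blocks
    have : ls = [] := List.eq_nil_of_length_eq_zero (by omega)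
    subst this; simp [pvLoopB, pvCanon]
  | succ n ih =>
    intro fuel ls hn hf i blocks
    match ls with
    | [] => simp [pvLoopB, pvCanon]
    | l :: t =>
      obtain ⟨f, rfl⟩ : ∃ f, fuel = f + 1 :=
        ⟨fuel - 1, by simp only [List.length_cons] at hf; omega⟩
      simp only [List.length_cons] at hn hf
      by_cases hg : (is_ip_line l || is_data_line l) = true
      · rw [pvLoopB]
        simp only [hg, if_true, pvRunB_eq]
        have hgood : ∀ x ∈ l :: pvTempPattern t, (is_ip_line x || is_data_line x) = true := by
          intro x hx
          rcases List.mem_cons.mp hx with rfl | hx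
          · exact hg
          · exact pvTempPattern_good t x hx
        have hbad := pvTempPattern_rest t
        have htp := pvTempPattern_len_le t
        have hrlen : (t.drop (pvTempPattern t).length).length ≤ f := by
          simp only [List.length_drop]; omega
        have hcanon := pvCanon_run (t.drop (pvTempPattern t).length) hbad f hrlen
          (l :: pvTempPattern t) (f + 1)
          (by simp only [List.cons_append, List.length_cons, List.length_append,
                List.length_drop]; omega)
          i hgood
        have hdecomp : l :: t = (l :: pvTempPattern t) ++ t.drop (pvTempPattern t).length := by
          rw [List.cons_append, pvTempPattern_decomp t]
        have hrn : (t.drop (pvTempPattern t).length).length ≤ n := by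
          simp only [List.length_drop]; omega
        rw [show pvCanon (f + 1) (l :: t) i =
              pvCanon (f + 1) ((l :: pvTempPattern t) ++ t.drop (pvTempPattern t).length) i from by
            rw [← hdecomp]]
        rw [hcanon]
        cases hfi : pvFirstIp (l :: pvTempPattern t) with
        | none =>
          rw [ih f _ hrn hrlen]
          simp [hfi]
        | some k =>
          rw [ih f _ hrn hrlen]
          simp [hfi]
      · have hgf : (is_ip_line l || is_data_line l) = false := by simpa using hg
        have hip : is_ip_line l = false := (Bool.or_eq_false_iff.mp hgf).1
        rw [pvLoopB, pvCanon, if_neg (by simp [hgf]), if_neg (by simp [hip])]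
        exact ih f t (by omega) (by omega) (i + 1) blocks

-- ===== VERDICT (by name: the statement is the Claim_ definition above) =====
theorem find_blocks_spec : Claim_equal_find_blocks := by
  intro lines _
  unfold Spec_find_blocks find_blocks find_blocks_alt
  rw [pvLoopA_eq_canon lines.length lines.length lines le_rfl le_rfl,
    pvLoopB_eq_canon lines.length lines.length lines le_rfl le_rfl]
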